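-- pv_equiv track=rewrite | github.com/AZCPCF/quera | 00183351/index.py | get_day_of_year
-- ===== SOURCE A (Python) =====
-- month_days = {
--     "Farvardin": 31, "Ordibehesht": 31, "Khordad": 31,
--     "Tir": 31, "Mordad": 31, "Shahrivar": 31,
--     "Mehr": 30, "Aban": 30, "Azar": 30,
--     "Dey": 30, "Bahman": 30, "Esfand": 29
-- }
--
-- def get_day_of_year(day, month):
--
--     day_of_year = 0
--     for m, days in month_days.items():
--         if m == month:
--             break
--         day_of_year += days
--     day_of_year += day
--     return day_of_year
-- ===== SOURCE B (Python) =====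
-- month_days = {
--     "Farvardin": 31, "Ordibehesht": 31, "Khordad": 31,
--     "Tir": 31, "Mordad": 31, "Shahrivar": 31,
--     "Mehr": 30, "Aban": 30, "Azar": 30,
--     "Dey": 30, "Bahman": 30, "Esfand": 29
-- }
--
-- _offsets = {}
-- _total = 0
-- for _name, _days in month_days.items():
--     _offsets[_name] = _total
--     _total += _days
--
-- def get_day_of_year(day, month):
--     return _offsets.get(month, _total) + day
-- ===== Notes on version B (the rewrite author's own statement) =====
-- stated objective: simpler
-- what changed: Replaced the per-call scan-with-break over month_days by a prefix-offset table built once at module scope, making the function body a single O(1) dict lookup (unknown months fall back to the grand total, matching A's full-sum behaviour).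
import Mathlib
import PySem

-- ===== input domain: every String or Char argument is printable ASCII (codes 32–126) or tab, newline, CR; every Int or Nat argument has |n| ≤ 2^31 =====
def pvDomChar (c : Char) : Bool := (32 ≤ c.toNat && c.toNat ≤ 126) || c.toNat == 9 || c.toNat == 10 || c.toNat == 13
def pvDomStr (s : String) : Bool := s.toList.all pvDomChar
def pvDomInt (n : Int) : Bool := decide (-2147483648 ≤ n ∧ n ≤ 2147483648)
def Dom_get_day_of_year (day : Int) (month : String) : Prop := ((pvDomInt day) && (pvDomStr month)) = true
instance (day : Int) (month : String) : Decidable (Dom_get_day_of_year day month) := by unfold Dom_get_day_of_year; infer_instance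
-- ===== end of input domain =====

-- B replaces A's per-call scan-with-break by a prefix-offset table built once, so the function is a single lookup (objective: simpler).

-- ===== PORT A =====
def month_days : PySem.Dict String Int := PySem.Dict.ofList
  [("Farvardin", 31), ("Ordibehesht", 31), ("Khordad", 31),
   ("Tir", 31), ("Mordad", 31), ("Shahrivar", 31),
   ("Mehr", 30), ("Aban", 30), ("Azar", 30),
   ("Dey", 30), ("Bahman", 30), ("Esfand", 29)]

-- the for-loop with break: walk the items, stop at the first key equal to month
def aLoop (month : String) : List (String × Int) → Int → Int
  | [], acc => acc
  | (m, days) :: rest, acc =>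
      if m == month then acc else aLoop month rest (acc + days)

def get_day_of_year (day : Int) (month : String) : Int :=
  aLoop month month_days.items 0 + day

-- ===== PORT B =====
-- module-scope loop of Source B building (_offsets, _total)
def offsetsTotal : PySem.Dict String Int × Int :=
  month_days.items.foldl
    (fun st p => (st.1.insert p.1 st.2, st.2 + p.2))
    (PySem.Dict.empty, 0)

def get_day_of_year_alt (day : Int) (month : String) : Int :=
  offsetsTotal.1.getD month offsetsTotal.2 + day

-- ===== PRECONDITION & SPEC =====
def Spec_get_day_of_year (day : Int) (month : String) (out : Int) : Prop := out = get_day_of_year_alt day month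
instance (day : Int) (month : String) (out : Int) : Decidable (Spec_get_day_of_year day month out) := by unfold Spec_get_day_of_year; infer_instance

-- ===== CLAIM (what is proved, stated in full; the proofs are below) =====
def Claim_equal_get_day_of_year : Prop := ∀ (day : Int) (month : String), Dom_get_day_of_year day month → Spec_get_day_of_year day month (get_day_of_year day month)

-- ===== LEMMAS AND PROOFS =====
theorem items_eq : month_days.items =
    [("Farvardin", 31), ("Ordibehesht", 31), ("Khordad", 31),
     ("Tir", 31), ("Mordad", 31), ("Shahrivar", 31),
     ("Mehr", 30), ("Aban", 30), ("Azar", 30),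
     ("Dey", 30), ("Bahman", 30), ("Esfand", 29)] := by decide

theorem offsets_eq : offsetsTotal =
    (PySem.Dict.mk
      [("Farvardin", 0), ("Ordibehesht", 31), ("Khordad", 62),
       ("Tir", 93), ("Mordad", 124), ("Shahrivar", 155),
       ("Mehr", 186), ("Aban", 216), ("Azar", 246),
       ("Dey", 276), ("Bahman", 306), ("Esfand", 336)], 365) := by decide

theorem both_eq (month : String) :
    aLoop month month_days.items 0 = offsetsTotal.1.getD month offsetsTotal.2 := by
  by_cases h1 : month = "Farvardin"
  · subst h1; decide
  by_cases h2 : month = "Ordibehesht"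
  · subst h2; decide
  by_cases h3 : month = "Khordad"
  · subst h3; decide
  by_cases h4 : month = "Tir"
  · subst h4; decide
  by_cases h5 : month = "Mordad"
  · subst h5; decide
  by_cases h6 : month = "Shahrivar"
  · subst h6; decide
  by_cases h7 : month = "Mehr"
  · subst h7; decide
  by_cases h8 : month = "Aban"
  · subst h8; decide
  by_cases h9 : month = "Azar"
  · subst h9; decide
  by_cases h10 : month = "Dey"
  · subst h10; decide
  by_cases h11 : month = "Bahman"
  · subst h11; decide
  by_cases h12 : month = "Esfand"
  · subst h12; decide
  rw [items_eq, offsets_eq]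
  simp [aLoop, PySem.Dict.getD, PySem.Dict.get?, Ne.symm h1, Ne.symm h2, Ne.symm h3, Ne.symm h4, Ne.symm h5, Ne.symm h6, Ne.symm h7, Ne.symm h8, Ne.symm h9, Ne.symm h10, Ne.symm h11, Ne.symm h12]

-- ===== VERDICT (by name: the statement is the Claim_ definition above) =====
theorem get_day_of_year_spec : Claim_equal_get_day_of_year := by
  intro day month _
  unfold Spec_get_day_of_year get_day_of_year get_day_of_year_alt
  rw [both_eq]
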